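-- pv_equiv track=rewrite | github.com/gaeluwu29/Proyecto_Final_Teorias_De_La_Computacion | Archivos/Programa/Maquina_Turing.py | pertenece_rg
-- ===== SOURCE A (Python) =====
-- def pertenece_rg(actual, producciones, objetivo):
--     if actual == objetivo:
--         return True
--
--     if actual not in producciones:
--         return False
--
--     for prod in producciones[actual]:
--         # Caso terminal solo
--         if prod == objetivo:
--             return True
--
--         # Forma típica: aA
--         if len(prod) >= 2 and prod[0].islower():
--             if objetivo.startswith(prod[0]):
--                 return pertenece_rg(prod[1:], producciones, objetivo[1:])
--
--     return False
-- ===== SOURCE B (Python) =====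
-- def pertenece_rg(actual, producciones, objetivo):
--     # Iterative version: explicit while-loop over mutable (actual, objetivo)
--     # instead of tail recursion; same greedy first-match chain.
--     while True:
--         if actual == objetivo:
--             return True
--         if actual not in producciones:
--             return False
--         for prod in producciones[actual]:
--             if prod == objetivo:
--                 return True
--             if len(prod) >= 2 and prod[0].islower() and objetivo.startswith(prod[0]):
--                 actual, objetivo = prod[1:], objetivo[1:]
--                 break
--         else:
--             return False
-- ===== Notes on version B (the rewrite author's own statement) =====
-- stated objective: alternative
-- what changed: Replaced the tail recursion with an explicit while-loop over mutable (actual, objetivo) state: a single scan of the current production list yields either a final verdict or the next state, and the loop re-enters; no call stack, same greedy first-match chain.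
import Mathlib
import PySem

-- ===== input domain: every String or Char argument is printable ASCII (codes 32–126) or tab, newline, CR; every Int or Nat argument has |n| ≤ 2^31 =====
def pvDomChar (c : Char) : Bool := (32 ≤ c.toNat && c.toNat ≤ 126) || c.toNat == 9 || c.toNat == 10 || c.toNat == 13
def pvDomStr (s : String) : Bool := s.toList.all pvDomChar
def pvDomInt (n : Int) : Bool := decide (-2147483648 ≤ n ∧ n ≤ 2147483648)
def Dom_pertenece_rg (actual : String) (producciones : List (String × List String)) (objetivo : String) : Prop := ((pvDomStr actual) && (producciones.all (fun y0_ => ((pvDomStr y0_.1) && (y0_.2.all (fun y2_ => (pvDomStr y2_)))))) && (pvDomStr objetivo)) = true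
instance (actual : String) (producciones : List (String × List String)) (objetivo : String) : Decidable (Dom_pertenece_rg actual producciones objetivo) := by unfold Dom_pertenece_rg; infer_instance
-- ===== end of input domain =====

-- B: explicit scan-and-loop (state machine) instead of recursion inside the production loop; objective: alternative decomposition, same cost.

-- ===== PORT A =====
-- Recursion in A's for-loop: each recursive call consumes one character of
-- objetivo (startswith a one-char prefix), so the mutual recursion is
-- well-founded on objetivo's length.
theorem pvTail_lt {s : String} {c : Char}
    (h : PySem.Str.startswith s (String.ofList [c]) = true) :
    (PySem.Str.slice s (some 1) none).toList.length < s.toList.length := by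
  have hp : [c] <+: s.toList := by
    rw [PySem.Str.startswith_eq] at h
    simpa using (PySem.Chars.startswith_iff _ _).mp (by simpa using h)
  rcases hp with ⟨t, ht⟩
  simp [PySem.Str.slice, PySem.Chars.slice_eq_listSlice, PySem.List.slice_from_one, ← ht]

mutual
def pertenece_rg (actual : String) (producciones : List (String × List String)) (objetivo : String) : Bool :=
  if actual = objetivo then true
  else
    match (PySem.Dict.mk producciones).get? actual with
    | none => false
    | some prods => pertenece_rg_loop producciones objetivo prods
termination_by (objetivo.toList.length, 1, 0)
decreasing_by exact Prod.Lex.right _ (Prod.Lex.left _ _ (by omega))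

def pertenece_rg_loop (producciones : List (String × List String)) (objetivo : String) (prods : List String) : Bool :=
  match prods with
  | [] => false
  | prod :: rest =>
    if prod = objetivo then true
    else if 2 <= prod.toList.length ∧ PySem.Chars.islower (prod.toList.headD ' ') = true then
      if h : PySem.Str.startswith objetivo (String.ofList [prod.toList.headD ' ']) = true then
        pertenece_rg (PySem.Str.slice prod (some 1) none) producciones (PySem.Str.slice objetivo (some 1) none)
      else pertenece_rg_loop producciones objetivo rest
    else pertenece_rg_loop producciones objetivo rest
termination_by (objetivo.toList.length, 0, prods.length)
decreasing_by
  · exact Prod.Lex.left _ _ (pvTail_lt h)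
  · exact Prod.Lex.right _ (Prod.Lex.right _ (Nat.lt_succ_self _))
  · exact Prod.Lex.right _ (Prod.Lex.right _ (Nat.lt_succ_self _))
end

-- ===== PORT B =====
-- B scans the production list once, returning either a final verdict
-- (Sum.inl) or the next (actual, objetivo) state (Sum.inr) …
def pvScan (objetivo : String) (prods : List String) : Bool ⊕ (String × String) :=
  match prods with
  | [] => Sum.inl false
  | prod :: rest =>
    if prod = objetivo then Sum.inl true
    else if 2 <= prod.toList.length ∧ PySem.Chars.islower (prod.toList.headD ' ') = true
            ∧ PySem.Str.startswith objetivo (String.ofList [prod.toList.headD ' ']) = true then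
      Sum.inr (PySem.Str.slice prod (some 1) none, PySem.Str.slice objetivo (some 1) none)
    else pvScan objetivo rest

theorem pvScan_shrinks {objetivo : String} {prods : List String} {st : String × String}
    (h : pvScan objetivo prods = Sum.inr st) :
    st.2.toList.length < objetivo.toList.length := by
  induction prods with
  | nil => simp [pvScan] at h
  | cons prod rest ih =>
    unfold pvScan at h
    split_ifs at h with h1 h2
    · have hlt := pvTail_lt (s := objetivo) h2.2.2
      rw [← Sum.inr.inj h]
      exact hlt
    · exact ih h

-- … and the driver loop re-enters with that state (the Python while-loop).
def pertenece_rg_alt (actual : String) (producciones : List (String × List String)) (objetivo : String) : Bool :=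
  if actual = objetivo then true
  else
    match (PySem.Dict.mk producciones).get? actual with
    | none => false
    | some prods =>
      match hs : pvScan objetivo prods with
      | Sum.inl b => b
      | Sum.inr st => pertenece_rg_alt st.1 producciones st.2
termination_by objetivo.toList.length
decreasing_by exact pvScan_shrinks hs

-- ===== PRECONDITION & SPEC =====
def Spec_pertenece_rg (actual : String) (producciones : List (String × List String)) (objetivo : String) (out : Bool) : Prop := out = pertenece_rg_alt actual producciones objetivo
instance (actual : String) (producciones : List (String × List String)) (objetivo : String) (out : Bool) : Decidable (Spec_pertenece_rg actual producciones objetivo out) := by unfold Spec_pertenece_rg; infer_instance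

-- ===== CLAIM (what is proved, stated in full; the proofs are below) =====
def Claim_equal_pertenece_rg : Prop := ∀ (actual : String) (producciones : List (String × List String)) (objetivo : String), Dom_pertenece_rg actual producciones objetivo → Spec_pertenece_rg actual producciones objetivo (pertenece_rg actual producciones objetivo)

-- ===== LEMMAS AND PROOFS =====
-- A's inner loop equals: run B's scan, then hand a continuation state to A.
theorem loop_eq_scan (producciones : List (String × List String)) (objetivo : String) (prods : List String) :
    pertenece_rg_loop producciones objetivo prods =
      match pvScan objetivo prods with
      | Sum.inl b => b
      | Sum.inr st => pertenece_rg st.1 producciones st.2 := by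
  induction prods with
  | nil => simp [pertenece_rg_loop, pvScan]
  | cons prod rest ih =>
    unfold pertenece_rg_loop pvScan
    by_cases h1 : prod = objetivo
    · rw [if_pos h1, if_pos h1]
    · rw [if_neg h1, if_neg h1]
      by_cases h2 : 2 <= prod.toList.length ∧ PySem.Chars.islower (prod.toList.headD ' ') = true
      · by_cases h3 : PySem.Str.startswith objetivo (String.ofList [prod.toList.headD ' ']) = true
        · rw [if_pos h2, dif_pos h3, if_pos ⟨h2.1, h2.2, h3⟩]
        · rw [if_pos h2, dif_neg h3, if_neg (fun hc => h3 hc.2.2), ih]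
      · rw [if_neg h2, if_neg (fun hc => h2 ⟨hc.1, hc.2.1⟩), ih]

theorem pertenece_rg_eq_alt (actual : String) (producciones : List (String × List String)) (objetivo : String) :
    pertenece_rg actual producciones objetivo = pertenece_rg_alt actual producciones objetivo := by
  generalize hn : objetivo.toList.length = n
  induction n using Nat.strong_induction_on generalizing actual objetivo with
  | _ n ih =>
    subst hn
    unfold pertenece_rg pertenece_rg_alt
    by_cases h1 : actual = objetivo
    · simp [h1]
    · simp only [h1, if_false]
      cases hg : (PySem.Dict.mk producciones).get? actual with
      | none => rfl
      | some prods =>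
        dsimp only
        rw [loop_eq_scan]
        cases hs : pvScan objetivo prods with
        | inl b => rfl
        | inr st =>
          dsimp only
          exact ih st.2.toList.length (pvScan_shrinks hs) st.1 st.2 rfl

-- ===== VERDICT (by name: the statement is the Claim_ definition above) =====
theorem pertenece_rg_spec : Claim_equal_pertenece_rg := by
  intro actual producciones objetivo _
  unfold Spec_pertenece_rg
  exact pertenece_rg_eq_alt actual producciones objetivo
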